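-- pv_equiv track=rewrite | github.com/yamnikov-oleg/notedown | markdown.py | header_level_or_0
-- ===== SOURCE A (Python) =====
-- def header_level_or_0(line):
--     level = 0
--
--     for c in line.strip():
--         if c == "#":
--             level += 1
--         elif c == " ":
--             break
--         else:
--             level = 0
--             break
--     # No break was called, header prefix wasn't terminated properly
--     else:
--         level = 0
--
--     # Only header levels 1..6 are allowed
--     if level > 6:
--         level = 0
--
--     return level
-- ===== SOURCE B (Python) =====
-- def header_level_or_0(line):
--     s = line.strip()
--     n = len(s) - len(s.lstrip('#'))
--     return n if 0 < n <= 6 and n < len(s) and s[n] == ' ' else 0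
-- ===== Notes on version B (the rewrite author's own statement) =====
-- stated objective: simpler
-- what changed: Replaces the char-by-char for/break/else state machine with a single leading-hash-strip count plus one arithmetic/guard expression.
import Mathlib
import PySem

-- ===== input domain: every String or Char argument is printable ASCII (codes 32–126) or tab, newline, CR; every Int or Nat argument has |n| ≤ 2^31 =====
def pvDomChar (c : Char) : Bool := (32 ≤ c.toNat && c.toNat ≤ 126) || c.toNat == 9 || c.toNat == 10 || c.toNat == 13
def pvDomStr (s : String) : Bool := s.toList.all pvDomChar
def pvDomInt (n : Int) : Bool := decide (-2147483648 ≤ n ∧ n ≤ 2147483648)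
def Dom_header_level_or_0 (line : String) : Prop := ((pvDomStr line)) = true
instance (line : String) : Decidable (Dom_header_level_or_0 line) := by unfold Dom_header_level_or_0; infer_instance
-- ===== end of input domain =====

-- B replaces A's char-by-char for/break/else state machine with a single leading-hash-strip
-- count of leading hashes plus one guard expression (objective: simpler).

-- ===== PORT A =====
-- A's for/break/else loop: '#' increments level; ' ' breaks keeping level;
-- any other char breaks with 0; falling off the end (the for-else) gives 0
def pvLoopA : List Char → Int → Int
  | [], _ => 0
  | c :: rest, level =>
      if c == '#' then pvLoopA rest (level + 1)
      else if c == ' ' then level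
      else 0

def header_level_or_0 (line : String) : Int :=
  let level := pvLoopA (PySem.Chars.strip line.toList) 0
  if level > 6 then 0 else level

-- ===== PORT B =====
def header_level_or_0_alt (line : String) : Int :=
  let s := PySem.Chars.strip line.toList
  -- s.lstrip('#') ported by hand as dropWhile (exact: it drops exactly the leading run of '#')
  let n : Int := (s.length : Int) - ((s.dropWhile (fun c => c == '#')).length : Int)
  if 0 < n ∧ n ≤ 6 ∧ n < (s.length : Int) ∧ PySem.List.pyGet? s n = some ' ' then n else 0

-- ===== PRECONDITION & SPEC =====
def Spec_header_level_or_0 (line : String) (out : Int) : Prop := out = header_level_or_0_alt line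
instance (line : String) (out : Int) : Decidable (Spec_header_level_or_0 line out) := by unfold Spec_header_level_or_0; infer_instance

-- ===== CLAIM (what is proved, stated in full; the proofs are below) =====
def Claim_equal_header_level_or_0 : Prop := ∀ (line : String), Dom_header_level_or_0 line → Spec_header_level_or_0 line (header_level_or_0 line)

-- ===== LEMMAS AND PROOFS =====

-- A's loop characterised by the leading-'#' run and the first char after it
theorem pvLoopA_eq (cs : List Char) (acc : Int) :
    pvLoopA cs acc =
      match cs.dropWhile (fun c => c == '#') with
      | [] => 0
      | d :: _ => if d = ' ' then acc + (cs.takeWhile (fun c => c == '#')).length else 0 := by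
  induction cs generalizing acc with
  | nil => simp [pvLoopA]
  | cons c rest ih =>
    by_cases h : c = '#'
    · subst h
      simp only [pvLoopA, List.dropWhile_cons, List.takeWhile_cons]
      simp only [beq_self_eq_true, if_true, ih]
      cases hd : rest.dropWhile (fun c => c == '#') with
      | nil => simp
      | cons d t =>
        simp only [List.length_cons]
        split <;> push_cast <;> ring_nf
    · have hb : (c == '#') = false := by simp [h]
      simp only [pvLoopA, List.dropWhile_cons, List.takeWhile_cons, hb]
      rcases eq_or_ne c ' ' with hc | hc <;> simp [hc]

-- the two result expressions agree on any char list (applied to the stripped line)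
theorem pv_both_eq (cs : List Char) :
    (let level := pvLoopA cs 0; if level > 6 then 0 else level) =
    (let n : Int := (cs.length : Int) - ((cs.dropWhile (fun c => c == '#')).length : Int)
     if 0 < n ∧ n ≤ 6 ∧ n < (cs.length : Int) ∧ PySem.List.pyGet? cs n = some ' ' then n else 0) := by
  show (if pvLoopA cs 0 > 6 then 0 else pvLoopA cs 0) = _
  rw [pvLoopA_eq]
  have hsplit : cs.takeWhile (fun c => c == '#') ++ cs.dropWhile (fun c => c == '#') = cs :=
    List.takeWhile_append_dropWhile
  obtain ⟨t, ht⟩ : ∃ t, cs.takeWhile (fun c => c == '#') = t := ⟨_, rfl⟩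
  obtain ⟨r, hr⟩ : ∃ r, cs.dropWhile (fun c => c == '#') = r := ⟨_, rfl⟩
  rw [ht, hr] at hsplit ⊢
  have hlen : cs.length = t.length + r.length := by rw [← hsplit]; simp
  cases r with
  | nil =>
    simp only []
    rw [if_neg (by intro h; simp at h)]
    simp
  | cons d rest =>
    have hlen' : cs.length = t.length + rest.length + 1 := by simp [hlen]; omega
    have hn : (cs.length : Int) - ((d :: rest).length : Int) = (t.length : Int) := by
      simp [hlen']
    have hget : PySem.List.pyGet? cs ((t.length : Nat) : Int) = some d := by
      rw [← hsplit]
      simp [PySem.List.pyGet?, PySem.List.pyIdx?]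
    simp only [hn, zero_add, hget, Option.some.injEq]
    rcases eq_or_ne d ' ' with hd | hd
    · subst hd
      simp only [and_true, if_true]
      split_ifs <;> first | rfl | omega | simp_all
    · simp only [if_neg hd]
      simp
      intro _ _ _ h
      exact absurd h hd

-- ===== VERDICT (by name: the statement is the Claim_ definition above) =====
theorem header_level_or_0_spec : Claim_equal_header_level_or_0 := by
  intro line _
  unfold Spec_header_level_or_0 header_level_or_0 header_level_or_0_alt
  exact pv_both_eq (PySem.Chars.strip line.toList)
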